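-- pv_equiv track=rewrite | github.com/raghavpatnecha/Mnemosyne | backend/parsers/email_parser.py | _format_headers_text
-- ===== SOURCE A (Python) =====
-- from typing import Dict, Any, List, Optional
--
-- def _format_headers_text(headers: Dict[str, str]) -> str:
--     """Format headers as readable text"""
--     lines = []
--     order = ['from', 'to', 'cc', 'subject', 'date']
--
--     for key in order:
--         if key in headers:
--             lines.append(f"{key.title()}: {headers[key]}")
--
--     # Add remaining headers
--     for key, value in headers.items():
--         if key not in order:
--             lines.append(f"{key.title()}: {value}")
--
--     return "\n".join(lines)
-- ===== SOURCE B (Python) =====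
-- def _format_headers_text(headers):
--     """Format headers as readable text (single-pass bucket partition)."""
--     order = ['from', 'to', 'cc', 'subject', 'date']
--     priority = {k: i for i, k in enumerate(order)}
--     buckets = [[], [], [], [], [], []]
--     for key, value in headers.items():
--         buckets[priority.get(key, 5)].append(f"{key.title()}: {value}")
--     return "\n".join(line for bucket in buckets for line in bucket)
-- ===== Notes on version B (the rewrite author's own statement) =====
-- stated objective: alternative
-- what changed: Replaces A's two filtered scans (one membership-scan per priority key, then a second full pass for the rest) by a single bucket-partition pass: each header is dropped into one of six priority buckets via a precomputed index map, and the buckets are flattened.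
import Mathlib
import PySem

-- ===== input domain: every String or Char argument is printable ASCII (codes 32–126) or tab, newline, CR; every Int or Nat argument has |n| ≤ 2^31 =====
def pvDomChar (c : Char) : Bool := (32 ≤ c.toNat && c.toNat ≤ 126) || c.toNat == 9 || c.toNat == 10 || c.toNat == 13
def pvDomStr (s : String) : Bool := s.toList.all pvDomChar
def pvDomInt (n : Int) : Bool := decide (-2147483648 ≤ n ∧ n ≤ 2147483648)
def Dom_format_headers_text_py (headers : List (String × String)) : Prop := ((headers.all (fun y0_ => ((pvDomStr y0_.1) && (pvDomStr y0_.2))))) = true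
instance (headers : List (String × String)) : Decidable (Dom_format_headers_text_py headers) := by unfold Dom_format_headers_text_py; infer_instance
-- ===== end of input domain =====

-- B replaces A's two filtered scans by one bucket-partition pass (priority index 0..5, then flatten); alternative algorithm, same cost.

-- shared helper: Python's f"{key.title()}: {value}" (str.title, exact on ASCII: a letter
-- is uppercased after a non-letter, lowercased after a letter)
def pvTitleGo : Bool → List Char → List Char
  | _, [] => []
  | prev, c :: rest =>
    if c.isAlpha then (if prev then c.toLower else c.toUpper) :: pvTitleGo true rest
    else c :: pvTitleGo false rest

def pvLine (k v : String) : List Char := pvTitleGo false k.toList ++ (':' :: ' ' :: v.toList)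

-- ===== PORT A =====
def format_headers_text_py (headers : List (String × String)) : String :=
  let order : List String := ["from", "to", "cc", "subject", "date"]
  let lines : List (List Char) := order.foldl (fun acc key =>
    if (PySem.Dict.mk headers).contains key then
      acc ++ [pvLine key (((PySem.Dict.mk headers).get? key).getD "")]
    else acc) []
  let lines := headers.foldl (fun acc kv =>
    if !(order.contains kv.1) then acc ++ [pvLine kv.1 kv.2] else acc) lines
  String.mk (PySem.Chars.join ['\n'] lines)

-- ===== PORT B =====
def format_headers_text_py_alt (headers : List (String × String)) : String :=
  let order : List String := ["from", "to", "cc", "subject", "date"]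
  let priority : PySem.Dict String Int :=
    PySem.Dict.ofList ((PySem.List.enumerate order).map (fun p : Int × String => (p.2, p.1)))
  let buckets : List (List (List Char)) := [[], [], [], [], [], []]
  -- buckets[priority.get(key, 5)].append(...): the index is always 0..5, so .toNat is exact
  let buckets := headers.foldl (fun bs kv =>
    bs.modify (priority.getD kv.1 5).toNat (· ++ [pvLine kv.1 kv.2])) buckets
  String.mk (PySem.Chars.join ['\n'] buckets.flatten)

-- ===== PRECONDITION & SPEC =====
-- Pre_ excludes association lists with duplicate keys: they are not representable as a
-- Python dict (whose items A receives), and the ports' first-match readings diverge there.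
def Pre_format_headers_text_py (headers : List (String × String)) : Prop :=
  (headers.map Prod.fst).Nodup
instance (headers : List (String × String)) : Decidable (Pre_format_headers_text_py headers) := by
  unfold Pre_format_headers_text_py; infer_instance

def pvWitness_format_headers_text_py : (List (String × String)) :=
  [("to", "Bob"), ("x-id", "7"), ("from", "Ann")]

def Spec_format_headers_text_py (headers : List (String × String)) (out : String) : Prop := out = format_headers_text_py_alt headers
instance (headers : List (String × String)) (out : String) : Decidable (Spec_format_headers_text_py headers out) := by unfold Spec_format_headers_text_py; infer_instance

-- ===== CLAIM (what is proved, stated in full; the proofs are below) =====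
def Claim_equal_format_headers_text_py : Prop := ∀ (headers : List (String × String)), Dom_format_headers_text_py headers → Pre_format_headers_text_py headers → Spec_format_headers_text_py headers (format_headers_text_py headers)

-- ===== LEMMAS AND PROOFS =====

-- the lines of the items whose key equals s, resp. whose key is outside the order list
def pvFib (s : String) (hs : List (String × String)) : List (List Char) :=
  (hs.filter (fun kv => kv.1 == s)).map (fun kv => pvLine kv.1 kv.2)

def pvRest (hs : List (String × String)) : List (List Char) :=
  (hs.filter (fun kv => !(["from", "to", "cc", "subject", "date"].contains kv.1))).map
    (fun kv => pvLine kv.1 kv.2)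

-- the priority dict of B, evaluated, and its bucket step (proof-side names)
def pvStep (bs : List (List (List Char))) (kv : String × String) : List (List (List Char)) :=
  bs.modify (((PySem.Dict.mk [("from", (0 : Int)), ("to", 1), ("cc", 2), ("subject", 3),
      ("date", 4)]).getD kv.1 5).toNat) (· ++ [pvLine kv.1 kv.2])

lemma pvStep_notin (bs : List (List (List Char))) (k v : String)
    (h0 : k ≠ "from") (h1 : k ≠ "to") (h2 : k ≠ "cc") (h3 : k ≠ "subject") (h4 : k ≠ "date") :
    pvStep bs (k, v) = bs.modify 5 (· ++ [pvLine k v]) := by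
  unfold pvStep
  simp [PySem.Dict.getD, PySem.Dict.get?_mk_cons, PySem.Dict.get?,
    Ne.symm h0, Ne.symm h1, Ne.symm h2, Ne.symm h3, Ne.symm h4]

-- B's fold distributes each item into the bucket of its priority
lemma pvB_buckets (hs : List (String × String)) (b0 b1 b2 b3 b4 b5 : List (List Char)) :
    hs.foldl (fun bs kv =>
        bs.modify ((PySem.Dict.ofList ((PySem.List.enumerate
            ["from", "to", "cc", "subject", "date"]).map (fun p : Int × String => (p.2, p.1)))).getD kv.1 5).toNat
          (· ++ [pvLine kv.1 kv.2])) [b0, b1, b2, b3, b4, b5]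
      = [b0 ++ pvFib "from" hs, b1 ++ pvFib "to" hs, b2 ++ pvFib "cc" hs,
         b3 ++ pvFib "subject" hs, b4 ++ pvFib "date" hs, b5 ++ pvRest hs] := by
  show hs.foldl pvStep [b0, b1, b2, b3, b4, b5] = _
  induction hs generalizing b0 b1 b2 b3 b4 b5 with
  | nil => simp [pvFib, pvRest]
  | cons kv rest ih =>
    obtain ⟨k, v⟩ := kv
    by_cases h0 : k = "from"
    · subst h0
      exact (ih (b0 ++ [pvLine "from" v]) b1 b2 b3 b4 b5).trans
        (by simp [pvFib, pvRest, List.filter_cons])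
    · by_cases h1 : k = "to"
      · subst h1
        exact (ih b0 (b1 ++ [pvLine "to" v]) b2 b3 b4 b5).trans
          (by simp [pvFib, pvRest, List.filter_cons])
      · by_cases h2 : k = "cc"
        · subst h2
          exact (ih b0 b1 (b2 ++ [pvLine "cc" v]) b3 b4 b5).trans
            (by simp [pvFib, pvRest, List.filter_cons])
        · by_cases h3 : k = "subject"
          · subst h3
            exact (ih b0 b1 b2 (b3 ++ [pvLine "subject" v]) b4 b5).trans
              (by simp [pvFib, pvRest, List.filter_cons])
          · by_cases h4 : k = "date"
            · subst h4
              exact (ih b0 b1 b2 b3 (b4 ++ [pvLine "date" v]) b5).trans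
                (by simp [pvFib, pvRest, List.filter_cons])
            · rw [List.foldl_cons, pvStep_notin _ _ _ h0 h1 h2 h3 h4]
              exact (ih b0 b1 b2 b3 b4 (b5 ++ [pvLine k v])).trans
                (by simp [pvFib, pvRest, List.filter_cons, h0, h1, h2, h3, h4])

-- under Nodup keys, the fiber of a key is A's conditional singleton
lemma pvFib_singleton (s : String) (hs : List (String × String))
    (hnd : (hs.map Prod.fst).Nodup) :
    pvFib s hs =
      if (PySem.Dict.mk hs).contains s then
        [pvLine s (((PySem.Dict.mk hs).get? s).getD "")] else [] := by
  induction hs with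
  | nil => simp [pvFib, PySem.Dict.contains, PySem.Dict.get?]
  | cons kv rest ih =>
    obtain ⟨k, v⟩ := kv
    simp only [List.map_cons, List.nodup_cons] at hnd
    by_cases hk : k = s
    · subst hk
      have hrest : pvFib k rest = [] := by
        unfold pvFib
        rw [List.filter_eq_nil_iff.mpr, List.map_nil]
        intro kv hmem hbe
        exact hnd.1 (by
          have h1 : kv.1 = k := by simpa using hbe
          exact h1 ▸ List.mem_map_of_mem hmem)
      have hcons : pvFib k ((k, v) :: rest) = pvLine k v :: pvFib k rest := by
        simp [pvFib, List.filter_cons]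
      rw [hcons, hrest]
      simp [PySem.Dict.contains, PySem.Dict.get?_mk_cons]
    · have hcons : pvFib s ((k, v) :: rest) = pvFib s rest := by
        simp [pvFib, List.filter_cons, hk]
      rw [hcons, ih hnd.2]
      have hb : (k == s) = false := beq_eq_false_iff_ne.mpr hk
      simp only [PySem.Dict.contains, PySem.Dict.get?_mk_cons, List.any_cons, hb,
        Bool.false_or]
      simp

-- ===== VERDICT (by name: the statement is the Claim_ definition above) =====
theorem format_headers_text_py_spec : Claim_equal_format_headers_text_py := by
  intro headers _ hpre
  unfold Spec_format_headers_text_py format_headers_text_py format_headers_text_py_alt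
  simp only
  rw [pvB_buckets]
  have step : ∀ (acc : List (List Char)) (s : String),
      (if (PySem.Dict.mk headers).contains s then
        acc ++ [pvLine s (((PySem.Dict.mk headers).get? s).getD "")] else acc)
      = acc ++ pvFib s headers := by
    intro acc s; rw [pvFib_singleton s headers hpre]; split <;> simp
  simp only [List.foldl_cons, List.foldl_nil]
  rw [step, step, step, step, step]
  rw [PySem.List.foldl_append_if]
  simp [pvRest, List.flatten, List.append_assoc]
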